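-- pv_equiv track=rewrite | github.com/2000mahan/Bioinformatics | MSA.py | score_calculator
-- ===== SOURCE A (Python) =====
-- def score_calculator(sequences):
--     score = 0
--     seq = list()
--     for i in sequences:
--         seq.append(i)
--
--     for i in range(0, len(seq[0])):
--         for p in range(0, len(seq) - 1):
--             for q in range(p + 1, len(seq)):
--                 if (seq[p][i] == seq[q][i]) and (seq[p][i] != "-"):
--                     score = score + match
--                 else:
--                     if (seq[p][i] == "-") and (seq[q][i] == "-"):
--                         score = score + 0
--                     elif (seq[p][i] != "-") and (seq[q][i] != "-"):
--                         score = score + mismatch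
--                     elif ((seq[p][i] == "-") and (seq[q][i] != "-")) or ((seq[p][i] != "-") and (seq[q][i] == "-")):
--                         score = score + gap
--     return score
--
-- match = 3
--
-- mismatch = -1
--
-- gap = -2
-- ===== SOURCE B (Python) =====
-- match = 3
--
-- mismatch = -1
--
-- gap = -2
--
-- def score_calculator(sequences):
--     # O(L*n): one pass per column, keeping per-character counts instead of scanning all pairs
--     score = 0
--     for i in range(len(sequences[0])):
--         counts = {}
--         gaps = 0
--         nongap = 0
--         for s in sequences:
--             c = s[i]
--             if c == "-":
--                 score += gap * nongap
--                 gaps += 1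
--             else:
--                 k = counts.get(c, 0)
--                 score += match * k + mismatch * (nongap - k) + gap * gaps
--                 counts[c] = k + 1
--                 nongap += 1
--     return score
-- ===== Notes on version B (the rewrite author's own statement) =====
-- stated objective: faster
-- what changed: Replaced the per-column all-pairs double loop by a single left-to-right pass per column that keeps a character-frequency dict plus gap/non-gap counters and adds each sequence's pair contributions against the prefix in O(1) per character, dropping the cost from O(L*n^2) to O(L*n).
import Mathlib
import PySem

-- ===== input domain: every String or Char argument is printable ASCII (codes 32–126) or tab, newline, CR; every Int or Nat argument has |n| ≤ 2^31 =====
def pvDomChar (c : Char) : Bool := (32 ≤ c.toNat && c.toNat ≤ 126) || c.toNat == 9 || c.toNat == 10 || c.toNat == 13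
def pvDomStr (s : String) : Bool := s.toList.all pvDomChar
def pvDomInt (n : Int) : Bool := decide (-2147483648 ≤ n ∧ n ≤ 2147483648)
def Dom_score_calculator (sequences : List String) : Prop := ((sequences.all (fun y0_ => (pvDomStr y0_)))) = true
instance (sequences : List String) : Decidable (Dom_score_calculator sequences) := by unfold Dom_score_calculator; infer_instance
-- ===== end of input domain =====

-- B replaces A's per-column all-pairs double loop by one pass per column with
-- character-frequency counts; same return value on every input where A returns.


-- ===== PORT A =====
def pvMatch : Int := 3
def pvMismatch : Int := -1
def pvGap : Int := -2

-- seq[p][i]: in range on every input admitted by Pre_; the ' ' default is never used there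
def pvCharAt (s : String) (i : Int) : Char := (PySem.Str.pyGet? s i).getD ' '

def score_calculator (sequences : List String) : Int :=
  let seq : List String := sequences.foldl (fun acc i => acc ++ [i]) []
  (PySem.List.pyRange 0 (PySem.Str.len (PySem.List.pyGetD seq 0 "")) 1).foldl
    (fun score i =>
      (PySem.List.pyRange 0 (PySem.List.len seq - 1) 1).foldl
        (fun score p =>
          (PySem.List.pyRange (p + 1) (PySem.List.len seq) 1).foldl
            (fun score q =>
              let cp := pvCharAt (PySem.List.pyGetD seq p "") i
              let cq := pvCharAt (PySem.List.pyGetD seq q "") i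
              if cp = cq ∧ cp ≠ '-' then score + pvMatch
              else if cp = '-' ∧ cq = '-' then score + 0
              else if cp ≠ '-' ∧ cq ≠ '-' then score + pvMismatch
              else if (cp = '-' ∧ cq ≠ '-') ∨ (cp ≠ '-' ∧ cq = '-') then score + pvGap
              else score)
            score)
        score)
    0

-- ===== PORT B =====
-- one pass per column; state: (score, counts, gaps, nongap)
def score_calculator_alt (sequences : List String) : Int :=
  (PySem.List.pyRange 0 (PySem.Str.len (PySem.List.pyGetD sequences 0 "")) 1).foldl
    (fun score i =>
      (sequences.foldl
        (fun (st : Int × PySem.Dict Char Int × Int × Int) (s : String) =>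
          let c := pvCharAt s i
          if c = '-' then
            (st.1 + pvGap * st.2.2.2, st.2.1, st.2.2.1 + 1, st.2.2.2)
          else
            let k := PySem.Dict.getD st.2.1 c 0
            (st.1 + pvMatch * k + pvMismatch * (st.2.2.2 - k) + pvGap * st.2.2.1,
             PySem.Dict.insert st.2.1 c (k + 1), st.2.2.1, st.2.2.2 + 1))
        (score, PySem.Dict.empty, 0, 0)).1)
    0

-- ===== PRECONDITION & SPEC =====
-- A raises IndexError on the empty list (sequences[0]) and whenever some sequence is
-- shorter than the first one (s[i] out of range); exactly those inputs are excluded.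
def Pre_score_calculator (sequences : List String) : Prop :=
  sequences ≠ [] ∧ ∀ s ∈ sequences, (sequences.headD "").length ≤ s.length
instance (sequences : List String) : Decidable (Pre_score_calculator sequences) := by
  unfold Pre_score_calculator; infer_instance
def pvWitness_score_calculator : List String := ["AB-", "A-C", "-BC"]

def Spec_score_calculator (sequences : List String) (out : Int) : Prop := out = score_calculator_alt sequences
instance (sequences : List String) (out : Int) : Decidable (Spec_score_calculator sequences out) := by unfold Spec_score_calculator; infer_instance

-- ===== CLAIM (what is proved, stated in full; the proofs are below) =====
def Claim_equal_score_calculator : Prop := ∀ (sequences : List String), Dom_score_calculator sequences → Pre_score_calculator sequences → Spec_score_calculator sequences (score_calculator sequences)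

-- ===== LEMMAS AND PROOFS =====

-- pair score of two column characters, as A's branch chain computes it
def pairF (x y : Char) : Int :=
  if x = y ∧ x ≠ '-' then 3
  else if x = '-' ∧ y = '-' then 0
  else if x ≠ '-' ∧ y ≠ '-' then -1
  else -2

-- sum of pairF over all pairs (earlier, later) of a column, first element against the rest
def pairSum : List Char → Int
  | [] => 0
  | x :: t => (t.map (pairF x)).sum + pairSum t

-- B's traversal order: each element paired against the prefix before it
def tailSum : List Char → List Char → Int
  | _, [] => 0
  | pref, y :: ys => (pref.map (fun x => pairF x y)).sum + tailSum (pref ++ [y]) ys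

def crossSum (pref ys : List Char) : Int :=
  (ys.map (fun y => (pref.map (fun x => pairF x y)).sum)).sum

-- the column-i characters of the sequences
def colChars (sequences : List String) (i : Int) : List Char :=
  sequences.map (fun s => pvCharAt s i)

-- A's inner pair sum for a fixed first index p
def pvG (cs : List Char) (p : Int) : Int :=
  ((PySem.List.pyRange (p + 1) (cs.length : Int) 1).map
    (fun q => pairF (PySem.List.pyGetD cs p ' ') (PySem.List.pyGetD cs q ' '))).sum

lemma pvCharAt_empty (i : Int) : pvCharAt "" i = ' ' := by
  have h0 : PySem.List.pyGet? ([] : List Char) i = none := by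
    rw [PySem.List.pyGet?_eq_none_iff]; simp [PySem.Raise.InRange]
  simp [pvCharAt, PySem.Str.pyGet?, PySem.Chars.pyGet?_eq_listPyGet?, h0]

lemma charAt_getD (l : List String) (p i : Int) :
    pvCharAt (PySem.List.pyGetD l p "") i = PySem.List.pyGetD (colChars l i) p ' ' := by
  rw [show (' ' : Char) = pvCharAt "" i from (pvCharAt_empty i).symm, colChars,
    PySem.List.pyGetD_map (fun s => pvCharAt s i) l p ""]

lemma stepA_eq (cp cq : Char) (sc : Int) :
    (if cp = cq ∧ cp ≠ '-' then sc + pvMatch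
     else if cp = '-' ∧ cq = '-' then sc + 0
     else if cp ≠ '-' ∧ cq ≠ '-' then sc + pvMismatch
     else if (cp = '-' ∧ cq ≠ '-') ∨ (cp ≠ '-' ∧ cq = '-') then sc + pvGap
     else sc) = sc + pairF cp cq := by
  unfold pairF pvMatch pvMismatch pvGap
  by_cases h1 : cp = cq ∧ cp ≠ '-' <;> by_cases h2 : cp = '-' <;> by_cases h3 : cq = '-' <;>
    simp_all

lemma pvG_zero (x : Char) (t : List Char) :
    pvG (x :: t) 0 = (t.map (pairF x)).sum := by
  unfold pvG
  rw [PySem.List.pyRange_one]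
  simp only [List.length_cons, List.map_map]
  have hlen : ((t.length + 1 : Nat) : Int) = (t.length : Int) + 1 := by push_cast; ring
  have h1 : ((t.length : Int) + 1 - (0 + 1)).toNat = t.length := by omega
  rw [hlen, h1]
  have h2 : ∀ (k : Nat), k ∈ List.range t.length →
      ((fun q => pairF (PySem.List.pyGetD (x :: t) 0 ' ') (PySem.List.pyGetD (x :: t) q ' ')) ∘
        fun (k : Nat) => (0 : Int) + 1 + (k : Int)) k
      = pairF x (t.getD k ' ') := by
    intro k hk
    simp only [Function.comp]
    have e : ((0 : Int) + 1 + (k : Int)) = ((k + 1 : Nat) : Int) := by push_cast; ring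
    rw [e, PySem.List.pyGetD_natCast, PySem.List.pyGetD_zero_cons]
    simp
  rw [List.map_congr_left h2]
  apply congrArg
  apply List.ext_getElem
  · simp
  · intro k hk1 hk2
    simp only [List.getElem_map, List.getElem_range]
    rw [List.getD_eq_getElem?_getD, List.getElem?_eq_getElem (by simpa using hk1)]
    rfl

lemma pvG_shift (x : Char) (t : List Char) (k : Nat) :
    pvG (x :: t) ((k : Int) + 1) = pvG t k := by
  unfold pvG
  rw [PySem.List.pyRange_one, PySem.List.pyRange_one]
  simp only [List.length_cons, List.map_map]
  have hlen : ((t.length + 1 : Nat) : Int) = (t.length : Int) + 1 := by push_cast; ring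
  rw [hlen]
  have h1 : ((t.length : Int) + 1 - ((k : Int) + 1 + 1)).toNat
      = ((t.length : Int) - ((k : Int) + 1)).toNat := by omega
  rw [h1]
  apply congrArg
  apply List.map_congr_left
  intro j hj
  simp only [Function.comp]
  have e1 : ((k : Int) + 1 + 1 + (j : Int)) = ((k + 2 + j : Nat) : Int) := by push_cast; ring
  have e2 : ((k : Int) + 1) = ((k + 1 : Nat) : Int) := by push_cast; ring
  have e3 : ((k : Int) + 1 + (j : Int)) = ((k + 1 + j : Nat) : Int) := by push_cast; ring
  rw [e3, e1, e2, PySem.List.pyGetD_natCast, PySem.List.pyGetD_natCast,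
    PySem.List.pyGetD_natCast, PySem.List.pyGetD_natCast]
  have e4 : k + 2 + j = (k + 1 + j) + 1 := by omega
  rw [e4]
  simp

lemma sum_pvG (cs : List Char) :
    ((PySem.List.pyRange 0 ((cs.length : Int) - 1) 1).map (pvG cs)).sum = pairSum cs := by
  induction cs with
  | nil => simp [PySem.List.pyRange_one_eq_nil, pairSum]
  | cons x t ih =>
    simp only [List.length_cons]
    have hlen : ((t.length + 1 : Nat) : Int) = (t.length : Int) + 1 := by push_cast; ring
    rw [hlen]
    rcases Nat.eq_zero_or_pos t.length with h0 | hpos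
    · have ht : t = [] := List.eq_nil_of_length_eq_zero h0
      subst ht
      simp [PySem.List.pyRange_one_eq_nil, pairSum]
    · rw [show (t.length : Int) + 1 - 1 = (t.length : Int) by ring]
      rw [PySem.List.pyRange_one_cons (by exact_mod_cast hpos)]
      rw [List.map_cons, List.sum_cons, pvG_zero]
      have hsh : ((PySem.List.pyRange (0 + 1) (t.length : Int) 1).map (pvG (x :: t))).sum
          = ((PySem.List.pyRange 0 ((t.length : Int) - 1) 1).map (pvG t)).sum := by
        rw [PySem.List.pyRange_one, PySem.List.pyRange_one]
        simp only [List.map_map]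
        rw [show ((t.length : Int) - (0 + 1)).toNat = ((t.length : Int) - 1 - 0).toNat by omega]
        apply congrArg
        apply List.map_congr_left
        intro j hj
        simp only [Function.comp]
        rw [show (0 + 1 + (j : Int)) = (j : Int) + 1 by ring, pvG_shift]
        norm_num
      rw [hsh, ih]
      rfl

lemma colA (cs : List Char) (s : Int) :
    (PySem.List.pyRange 0 ((cs.length : Int) - 1) 1).foldl
      (fun sc p =>
        (PySem.List.pyRange (p + 1) (cs.length : Int) 1).foldl
          (fun sc q => sc + pairF (PySem.List.pyGetD cs p ' ') (PySem.List.pyGetD cs q ' ')) sc) s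
    = s + pairSum cs := by
  have h : ∀ (sc : Int), ∀ p ∈ PySem.List.pyRange 0 ((cs.length : Int) - 1) 1,
      (PySem.List.pyRange (p + 1) (cs.length : Int) 1).foldl
        (fun sc q => sc + pairF (PySem.List.pyGetD cs p ' ') (PySem.List.pyGetD cs q ' ')) sc
      = sc + pvG cs p := by
    intro sc p _
    rw [PySem.List.foldl_add]
    rfl
  rw [PySem.List.foldl_congr_mem _ _ (fun sc p => sc + pvG cs p) s h,
    PySem.List.foldl_add, sum_pvG]

lemma colstep (pref : List Char) (c : Char) :
    ((pref.map (fun x => pairF x c)).sum) =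
    (if c = '-' then (-2) * (pref.countP (fun x => decide (x ≠ '-')) : Int)
     else 3 * (pref.count c : Int)
          + (-1) * ((pref.countP (fun x => decide (x ≠ '-')) : Int) - (pref.count c : Int))
          + (-2) * (pref.count '-' : Int)) := by
  induction pref with
  | nil => simp
  | cons x t ih =>
    simp only [List.map_cons, List.sum_cons, List.count_cons, List.countP_cons]
    by_cases hc : c = '-' <;> by_cases hx : x = '-' <;> by_cases hxc : x = c <;>
      simp_all [pairF] <;> ring

lemma tailSum_eq (ys pref : List Char) :
    tailSum pref ys = crossSum pref ys + pairSum ys := by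
  induction ys generalizing pref with
  | nil => simp [tailSum, crossSum, pairSum]
  | cons y ys ih =>
    rw [tailSum, ih]
    have hc : crossSum (pref ++ [y]) ys = crossSum pref ys + (ys.map (pairF y)).sum := by
      unfold crossSum
      rw [← PySem.List.sum_map_add_int]
      apply congrArg
      apply List.map_congr_left
      intro z hz
      simp
    rw [hc]
    show _ = crossSum pref (y :: ys) + pairSum (y :: ys)
    rw [crossSum, pairSum]
    simp [crossSum]
    ring

lemma B_loop (i : Int) (l : List String) (pref : List Char) (s : Int) (d : PySem.Dict Char Int)
    (hd : ∀ c, c ≠ '-' → d.getD c 0 = (pref.count c : Int)) :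
    (l.foldl
      (fun (st : Int × PySem.Dict Char Int × Int × Int) (s : String) =>
        if pvCharAt s i = '-' then
          (st.1 + pvGap * st.2.2.2, st.2.1, st.2.2.1 + 1, st.2.2.2)
        else
          (st.1 + pvMatch * PySem.Dict.getD st.2.1 (pvCharAt s i) 0
             + pvMismatch * (st.2.2.2 - PySem.Dict.getD st.2.1 (pvCharAt s i) 0)
             + pvGap * st.2.2.1,
           PySem.Dict.insert st.2.1 (pvCharAt s i) (PySem.Dict.getD st.2.1 (pvCharAt s i) 0 + 1),
           st.2.2.1, st.2.2.2 + 1))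
      ((s, d, (pref.count '-' : Int), (pref.countP (fun x => decide (x ≠ '-')) : Int))
        : Int × PySem.Dict Char Int × Int × Int)).1
    = s + tailSum pref (l.map (fun s => pvCharAt s i)) := by
  induction l generalizing pref s d with
  | nil => simp [tailSum]
  | cons str l ih =>
    rw [List.foldl_cons, List.map_cons, tailSum]
    by_cases h : pvCharAt str i = '-'
    · rw [h]
      simp only [if_pos]
      have h1 : ((pref.count '-' : Nat) : Int) + 1 = (((pref ++ ['-']).count '-' : Nat) : Int) := by
        simp [List.count_append]
      have h2 : ((pref.countP (fun x => decide (x ≠ '-')) : Nat) : Int)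
          = (((pref ++ ['-']).countP (fun x => decide (x ≠ '-')) : Nat) : Int) := by
        simp [List.countP_append]
      have hd' : ∀ c', c' ≠ '-' → d.getD c' 0 = (((pref ++ ['-']).count c' : Nat) : Int) := by
        intro c' hc'
        rw [hd c' hc']
        simp [List.count_append, List.count_singleton]
        exact fun hx => hc' hx.symm
      rw [h1, h2, ih (pref ++ ['-']) _ d hd']
      rw [colstep pref '-', if_pos rfl]
      simp only [pvGap]
      rw [← h2]
      ring
    · rw [if_neg h]
      have hk : d.getD (pvCharAt str i) 0 = (pref.count (pvCharAt str i) : Int) := hd _ h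
      have h1 : ((pref.count '-' : Nat) : Int)
          = (((pref ++ [pvCharAt str i]).count '-' : Nat) : Int) := by
        simp [List.count_append, List.count_singleton]
        exact h
      have h2 : ((pref.countP (fun x => decide (x ≠ '-')) : Nat) : Int) + 1
          = (((pref ++ [pvCharAt str i]).countP (fun x => decide (x ≠ '-')) : Nat) : Int) := by
        simp [List.countP_append, h]
      have hd' : ∀ c', c' ≠ '-' →
          (d.insert (pvCharAt str i) (d.getD (pvCharAt str i) 0 + 1)).getD c' 0
            = (((pref ++ [pvCharAt str i]).count c' : Nat) : Int) := by
        intro c' hc'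
        rw [PySem.Dict.getD_insert]
        by_cases hcc : c' = pvCharAt str i
        · subst hcc
          simp [hk, List.count_append]
        · simp [hcc, hd c' hc', List.count_append, List.count_singleton]
          exact fun hx => hcc hx.symm
      rw [h1, h2, ih (pref ++ [pvCharAt str i]) _ _ hd']
      rw [colstep pref (pvCharAt str i)]
      simp only [if_neg h, pvMatch, pvMismatch, pvGap, hk]
      rw [← h1]
      ring

-- ===== VERDICT (by name: the statement is the Claim_ definition above) =====
theorem score_calculator_spec : Claim_equal_score_calculator := by
  intro sequences _ _
  unfold Spec_score_calculator score_calculator score_calculator_alt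
  rw [PySem.List.foldl_append_singleton_eq_self]
  simp only [List.nil_append]
  apply PySem.List.foldl_congr_mem
  intro score i _
  have hcs : (colChars sequences i).length = sequences.length := by simp [colChars]
  -- A's column = score + pairSum (colChars sequences i)
  have hA : (PySem.List.pyRange 0 (PySem.List.len sequences - 1) 1).foldl
        (fun score p =>
          (PySem.List.pyRange (p + 1) (PySem.List.len sequences) 1).foldl
            (fun score q =>
              if pvCharAt (PySem.List.pyGetD sequences p "") i = pvCharAt (PySem.List.pyGetD sequences q "") i ∧ pvCharAt (PySem.List.pyGetD sequences p "") i ≠ '-' then score + pvMatch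
              else if pvCharAt (PySem.List.pyGetD sequences p "") i = '-' ∧ pvCharAt (PySem.List.pyGetD sequences q "") i = '-' then score + 0
              else if pvCharAt (PySem.List.pyGetD sequences p "") i ≠ '-' ∧ pvCharAt (PySem.List.pyGetD sequences q "") i ≠ '-' then score + pvMismatch
              else if (pvCharAt (PySem.List.pyGetD sequences p "") i = '-' ∧ pvCharAt (PySem.List.pyGetD sequences q "") i ≠ '-') ∨ (pvCharAt (PySem.List.pyGetD sequences p "") i ≠ '-' ∧ pvCharAt (PySem.List.pyGetD sequences q "") i = '-') then score + pvGap
              else score)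
            score)
        score
      = score + pairSum (colChars sequences i) := by
    simp only [PySem.List.len_eq]
    rw [← hcs]
    have houter : ∀ (sc : Int), ∀ p ∈ PySem.List.pyRange 0 (((colChars sequences i).length : Int) - 1) 1,
        (PySem.List.pyRange (p + 1) ((colChars sequences i).length : Int) 1).foldl
          (fun score q =>
            if pvCharAt (PySem.List.pyGetD sequences p "") i = pvCharAt (PySem.List.pyGetD sequences q "") i ∧ pvCharAt (PySem.List.pyGetD sequences p "") i ≠ '-' then score + pvMatch
            else if pvCharAt (PySem.List.pyGetD sequences p "") i = '-' ∧ pvCharAt (PySem.List.pyGetD sequences q "") i = '-' then score + 0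
            else if pvCharAt (PySem.List.pyGetD sequences p "") i ≠ '-' ∧ pvCharAt (PySem.List.pyGetD sequences q "") i ≠ '-' then score + pvMismatch
            else if (pvCharAt (PySem.List.pyGetD sequences p "") i = '-' ∧ pvCharAt (PySem.List.pyGetD sequences q "") i ≠ '-') ∨ (pvCharAt (PySem.List.pyGetD sequences p "") i ≠ '-' ∧ pvCharAt (PySem.List.pyGetD sequences q "") i = '-') then score + pvGap
            else score)
          sc
        = (PySem.List.pyRange (p + 1) ((colChars sequences i).length : Int) 1).foldl
            (fun sc q => sc + pairF (PySem.List.pyGetD (colChars sequences i) p ' ')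
              (PySem.List.pyGetD (colChars sequences i) q ' ')) sc := by
      intro sc p _
      apply PySem.List.foldl_congr_mem
      intro sc' q _
      rw [stepA_eq, charAt_getD, charAt_getD]
    rw [PySem.List.foldl_congr_mem _ _ _ score houter, colA]
  -- B's column = score + pairSum (colChars sequences i)
  have hB := B_loop i sequences [] score PySem.Dict.empty
    (fun c hc => by simp [PySem.Dict.getD_empty])
  rw [tailSum_eq] at hB
  simp only [crossSum, List.map_nil, List.sum_nil, List.count_nil, List.countP_nil,
    Nat.cast_zero] at hB
  simp only [List.map_const', List.sum_replicate, smul_zero, zero_add] at hB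
  exact hA.trans hB.symm
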